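-- pv_equiv track=rewrite | github.com/yonsweng/ps | kakao-blind/2022-round1/1.py | solution
-- ===== SOURCE A (Python) =====
-- def solution(id_list, report, k):
--     answer = []
--
--     reporting = {key: set() for key in id_list}
--     reported = {key: set() for key in id_list}
--
--     for r in report:
--         reporter, reportee = r.split()
--         reporting[reporter].add(reportee)
--         reported[reportee].add(reporter)
--
--     stopped = set()
--     for reportee in reported:
--         if len(reported[reportee]) >= k:
--             stopped.add(reportee)
--
--     for reporter in id_list:
--         cnt = 0
--         for reportee in reporting[reporter]:
--             if reportee in stopped:
--                 cnt += 1
--         answer.append(cnt)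
--
--     return answer
--
-- id_list = ["con", "ryan"]
--
-- report = ["ryan con", "ryan con", "ryan con", "ryan con"]
--
-- k = 3
--
-- answer = solution(id_list, report, k)
-- ===== SOURCE B (Python) =====
-- def solution(id_list, report, k):
--     # Brute force per user: no adjacency dicts, no precomputed stopped set; rescan the flat
--     # pair list directly with set comprehensions.
--     pairs = [tuple(r.split()) for r in report]
--
--     def nrep(v):
--         return len({a for a, b in pairs if b == v})
--
--     return [sum(nrep(v) >= k for v in {b for a, b in pairs if a == u}) for u in id_list]
-- ===== Notes on version B (the rewrite author's own statement) =====
-- stated objective: alternative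
-- what changed: Drops A's precomputed adjacency dicts and stopped set entirely: B makes a flat pair list and, per user, brute-force rescans it with set comprehensions, recomputing each reportee's distinct-reporter count on demand instead of indexing anything.
import Mathlib
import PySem

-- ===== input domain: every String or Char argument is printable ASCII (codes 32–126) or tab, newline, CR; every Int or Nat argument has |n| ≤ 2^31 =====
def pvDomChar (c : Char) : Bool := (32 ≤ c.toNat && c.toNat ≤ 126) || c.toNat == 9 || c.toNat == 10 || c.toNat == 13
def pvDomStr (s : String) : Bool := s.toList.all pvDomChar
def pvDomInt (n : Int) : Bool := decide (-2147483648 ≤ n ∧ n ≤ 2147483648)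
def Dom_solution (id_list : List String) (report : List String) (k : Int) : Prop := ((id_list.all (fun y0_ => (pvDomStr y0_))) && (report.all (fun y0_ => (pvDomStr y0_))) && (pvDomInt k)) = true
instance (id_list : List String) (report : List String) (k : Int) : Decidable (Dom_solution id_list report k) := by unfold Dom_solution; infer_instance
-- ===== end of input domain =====

-- B drops A's adjacency dicts and stopped set: it brute-force rescans a flat pair list per user
-- with set comprehensions (alternative decomposition, not faster).

-- 'reporter, reportee = r.split()' / 'tuple(r.split())' (both ports); the catch-all arm is
-- unreachable under Pre_solution.
def pyPair (r : String) : String × String :=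
  match PySem.Str.split₀ r with
  | [a, b] => (a, b)
  | _ => ("", "")

-- ===== PORT A =====
-- 'reporting[reporter].add(reportee)' is a KeyError for an unknown key; 'modify … Set.empty' is the
-- total form, exact under Pre_solution (every name occurring in report is a key).
def solution (id_list : List String) (report : List String) (k : Int) : List Int :=
  let reporting0 : PySem.Dict String (PySem.Set String) :=
    id_list.foldl (fun d key => d.insert key PySem.Set.empty) PySem.Dict.empty
  let reported0 : PySem.Dict String (PySem.Set String) :=
    id_list.foldl (fun d key => d.insert key PySem.Set.empty) PySem.Dict.empty
  let st := report.foldl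
    (fun (st : PySem.Dict String (PySem.Set String) × PySem.Dict String (PySem.Set String)) r =>
      let p := pyPair r
      (st.1.modify p.1 PySem.Set.empty (fun s => PySem.Set.add s p.2),
       st.2.modify p.2 PySem.Set.empty (fun s => PySem.Set.add s p.1)))
    (reporting0, reported0)
  let stopped : PySem.Set String := (st.2.keys).foldl
    (fun s reportee =>
      if k ≤ PySem.Set.len (st.2.getD reportee PySem.Set.empty)
      then PySem.Set.add s reportee else s) PySem.Set.empty
  id_list.map (fun reporter =>
    (st.1.getD reporter PySem.Set.empty).foldl
      (fun cnt reportee => if PySem.Set.contains stopped reportee then cnt + 1 else cnt) (0 : Int))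

-- ===== PORT B =====
def solution_alt (id_list : List String) (report : List String) (k : Int) : List Int :=
  let pairs : List (String × String) := report.map pyPair
  let nrep : String → Int := fun v =>
    PySem.Set.len (PySem.Set.ofList ((pairs.filter (fun p => p.2 == v)).map Prod.fst))
  id_list.map (fun u =>
    (PySem.Set.ofList ((pairs.filter (fun p => p.1 == u)).map Prod.snd)).foldl
      (fun c v => c + (if k ≤ nrep v then (1 : Int) else 0)) 0)

-- ===== PRECONDITION & SPEC =====
-- Pre_ excludes exactly the inputs where Python A raises: a report line whose split is not two
-- words (ValueError on unpacking) or names a user outside id_list (KeyError).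
def Pre_solution (id_list : List String) (report : List String) (k : Int) : Prop :=
  ∀ r ∈ report, (PySem.Str.split₀ r).length = 2 ∧ ∀ t ∈ PySem.Str.split₀ r, t ∈ id_list
instance (id_list : List String) (report : List String) (k : Int) : Decidable (Pre_solution id_list report k) := by unfold Pre_solution; infer_instance
def pvWitness_solution : List String × List String × Int := (["con", "ryan"], ["ryan con", "ryan con"], 1)

def Spec_solution (id_list : List String) (report : List String) (k : Int) (out : List Int) : Prop := out = solution_alt id_list report k
instance (id_list : List String) (report : List String) (k : Int) (out : List Int) : Decidable (Spec_solution id_list report k out) := by unfold Spec_solution; infer_instance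

-- ===== CLAIM (what is proved, stated in full; the proofs are below) =====
def Claim_equal_solution : Prop := ∀ (id_list : List String) (report : List String) (k : Int), Dom_solution id_list report k → Pre_solution id_list report k → Spec_solution id_list report k (solution id_list report k)

-- ===== LEMMAS AND PROOFS =====

-- proof-only names for the ports' intermediate states
def pvP (rep : List String) : List (String × String) := rep.map pyPair

def pvD0 (ids : List String) : PySem.Dict String (PySem.Set String) :=
  ids.foldl (fun d key => d.insert key PySem.Set.empty) PySem.Dict.empty

def pvSt1 (ids rep : List String) : PySem.Dict String (PySem.Set String) :=
  rep.foldl (fun d r => d.modify (pyPair r).1 PySem.Set.empty (fun s => PySem.Set.add s (pyPair r).2)) (pvD0 ids)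

def pvSt2 (ids rep : List String) : PySem.Dict String (PySem.Set String) :=
  rep.foldl (fun d r => d.modify (pyPair r).2 PySem.Set.empty (fun s => PySem.Set.add s (pyPair r).1)) (pvD0 ids)

def pvStp (ids rep : List String) (k : Int) : PySem.Set String :=
  (pvSt2 ids rep).keys.foldl
    (fun s v => if k ≤ PySem.Set.len ((pvSt2 ids rep).getD v PySem.Set.empty)
                then PySem.Set.add s v else s) PySem.Set.empty

-- B's distinct-reporter / distinct-reportee lists
def pvNrepL (rep : List String) (v : String) : PySem.Set String :=
  PySem.Set.ofList (((pvP rep).filter (fun p => p.2 == v)).map Prod.fst)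

def pvTgtL (rep : List String) (u : String) : PySem.Set String :=
  PySem.Set.ofList (((pvP rep).filter (fun p => p.1 == u)).map Prod.snd)

-- the simultaneous fold over the two adjacency dicts is the pair of the separate folds
theorem pvStSplit (rep : List String) :
    ∀ (d1 d2 : PySem.Dict String (PySem.Set String)),
    rep.foldl (fun st r =>
        (st.1.modify (pyPair r).1 PySem.Set.empty (fun s => PySem.Set.add s (pyPair r).2),
         st.2.modify (pyPair r).2 PySem.Set.empty (fun s => PySem.Set.add s (pyPair r).1))) (d1, d2)
      = (rep.foldl (fun d r => d.modify (pyPair r).1 PySem.Set.empty (fun s => PySem.Set.add s (pyPair r).2)) d1,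
         rep.foldl (fun d r => d.modify (pyPair r).2 PySem.Set.empty (fun s => PySem.Set.add s (pyPair r).1)) d2) := by
  induction rep with
  | nil => intro d1 d2; rfl
  | cons r rep ih => intro d1 d2; exact ih _ _

theorem pvA_unfold (ids rep : List String) (k : Int) :
    solution ids rep k = ids.map (fun u =>
      ((pvSt1 ids rep).getD u PySem.Set.empty).foldl
        (fun cnt b => if PySem.Set.contains (pvStp ids rep k) b then cnt + 1 else cnt) (0 : Int)) := by
  simp only [solution]
  rw [pvStSplit]
  rfl

theorem pvB_unfold (ids rep : List String) (k : Int) :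
    solution_alt ids rep k = ids.map (fun u =>
      (pvTgtL rep u).foldl
        (fun c v => c + (if k ≤ PySem.Set.len (pvNrepL rep v) then (1 : Int) else 0)) 0) := rfl

-- a fold inserting the constant c leaves every getD-with-default-c at c
theorem pvConstD {v : Type} (c : v) (l : List String) (d : PySem.Dict String v) (w : String)
    (h : d.getD w c = c) : (l.foldl (fun d u => d.insert u c) d).getD w c = c := by
  induction l generalizing d with
  | nil => exact h
  | cons u l ih =>
    refine ih _ ?_
    rw [PySem.Dict.getD_insert]
    split <;> [rfl; exact h]

theorem pvD0_getD (ids : List String) (w : String) :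
    (pvD0 ids).getD w PySem.Set.empty = PySem.Set.empty :=
  pvConstD _ _ _ _ (PySem.Dict.getD_empty _ _)

-- membership in an adjacency dict built by  d[f p].add(g p)  over l
theorem pvMemAdj (f g : String → String) (l : List String) :
    ∀ (d : PySem.Dict String (PySem.Set String)) (w a : String),
      (a ∈ (l.foldl (fun d r => d.modify (f r) PySem.Set.empty (fun s => PySem.Set.add s (g r))) d).getD w PySem.Set.empty
        ↔ a ∈ d.getD w PySem.Set.empty ∨ ∃ r ∈ l, f r = w ∧ g r = a) := by
  induction l with
  | nil => simp
  | cons r l ih =>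
    intro d w a
    rw [List.foldl_cons, ih, PySem.Dict.getD_modify]
    simp only [List.exists_mem_cons_iff]
    by_cases hw : w = f r
    · subst hw
      rw [if_pos rfl]
      simp only [PySem.Set.mem_add, true_and]
      constructor
      · rintro ((h | h) | h)
        · exact Or.inl h
        · exact Or.inr (Or.inl h.symm)
        · exact Or.inr (Or.inr h)
      · rintro (h | (h | h))
        · exact Or.inl (Or.inl h)
        · exact Or.inl (Or.inr h.symm)
        · exact Or.inr h
    · rw [if_neg hw]
      constructor
      · rintro (h | h)
        · exact Or.inl h
        · exact Or.inr (Or.inr h)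
      · rintro (h | (⟨h1, -⟩ | h))
        · exact Or.inl h
        · exact absurd h1.symm hw
        · exact Or.inr h

theorem pvNodupAdj (f g : String → String) (l : List String) :
    ∀ (d : PySem.Dict String (PySem.Set String)),
      (∀ w, ((d.getD w PySem.Set.empty : PySem.Set String) : List String).Nodup) →
      ∀ w, (((l.foldl (fun d r => d.modify (f r) PySem.Set.empty (fun s => PySem.Set.add s (g r))) d).getD w PySem.Set.empty : PySem.Set String) : List String).Nodup := by
  induction l with
  | nil => intro d h w; exact h w
  | cons r l ih =>
    intro d h w
    refine ih _ (fun w' => ?_) w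
    rw [PySem.Dict.getD_modify]
    split
    · exact PySem.Set.nodup_add _ _ (h _)
    · exact h w'

-- membership in the keys of an adjacency dict built by modify over l
theorem pvKeysAdj (f : String → String) (g : PySem.Dict String (PySem.Set String) → String → PySem.Set String → PySem.Set String)
    (l : List String) (d : PySem.Dict String (PySem.Set String)) (w : String) :
    (w ∈ (l.foldl (fun d r => d.modify (f r) PySem.Set.empty (g d r)) d).keys
      ↔ w ∈ d.keys ∨ ∃ r ∈ l, f r = w) := by
  rw [PySem.Dict.keys_foldl_modify_key l f PySem.Set.empty g d, PySem.Set.mem_update]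
  simp [eq_comm]

-- membership in a set built by a filtered add-loop
theorem pvMemFilterAdd (q : String → Prop) [DecidablePred q] (l : List String) :
    ∀ (s0 : PySem.Set String) (b : String),
      (b ∈ l.foldl (fun s x => if q x then PySem.Set.add s x else s) s0 ↔ b ∈ s0 ∨ (b ∈ l ∧ q b)) := by
  induction l with
  | nil => simp
  | cons x l ih =>
    intro s0 b
    rw [List.foldl_cons, ih]
    by_cases hx : q x
    · rw [if_pos hx, PySem.Set.mem_add]
      constructor
      · rintro ((h | rfl) | ⟨h1, h2⟩)
        · exact Or.inl h
        · exact Or.inr ⟨List.mem_cons_self, hx⟩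
        · exact Or.inr ⟨List.mem_cons_of_mem _ h1, h2⟩
      · rintro (h | ⟨h1, h2⟩)
        · exact Or.inl (Or.inl h)
        · rcases List.mem_cons.mp h1 with rfl | h1
          · exact Or.inl (Or.inr rfl)
          · exact Or.inr ⟨h1, h2⟩
    · rw [if_neg hx]
      constructor
      · rintro (h | ⟨h1, h2⟩)
        · exact Or.inl h
        · exact Or.inr ⟨List.mem_cons_of_mem _ h1, h2⟩
      · rintro (h | ⟨h1, h2⟩)
        · exact Or.inl h
        · rcases List.mem_cons.mp h1 with rfl | h1
          · exact absurd h2 hx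
          · exact Or.inr ⟨h1, h2⟩

-- A's inner counting loop is countP
theorem pvCountFold {a : Type} (q : a → Bool) (l : List a) :
    ∀ (c : Int), l.foldl (fun cnt b => if q b then cnt + 1 else cnt) c = c + (l.countP q : Int) := by
  induction l with
  | nil => simp
  | cons b l ih =>
    intro c
    rw [List.foldl_cons, List.countP_cons]
    by_cases h : q b = true <;> simp [h, ih] <;> omega

-- B's inner sum loop is countP
theorem pvSumFold {a : Type} (q : a → Prop) [DecidablePred q] (l : List a) :
    ∀ (c : Int), l.foldl (fun cnt b => cnt + (if q b then (1 : Int) else 0)) c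
      = c + (l.countP (fun b => decide (q b)) : Int) := by
  induction l with
  | nil => simp
  | cons b l ih =>
    intro c
    rw [List.foldl_cons, List.countP_cons]
    by_cases h : q b <;> simp [h, ih] <;> omega

-- two nodup lists with the same membership are permutations
theorem pvPermOf {a : Type} [DecidableEq a] (L M : List a) (hL : L.Nodup) (hM : M.Nodup)
    (h : ∀ x, x ∈ L ↔ x ∈ M) : L.Perm M :=
  (List.perm_ext_iff_of_nodup hL hM).mpr h

-- membership characterisation of both adjacency lists in terms of the flat pair list
theorem pvSt1_mem (ids rep : List String) (u b : String) :
    b ∈ (pvSt1 ids rep).getD u PySem.Set.empty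
      ↔ ∃ p ∈ pvP rep, p.1 = u ∧ p.2 = b := by
  rw [pvSt1, pvMemAdj (fun r => (pyPair r).1) (fun r => (pyPair r).2)]
  rw [pvD0_getD]
  simp only [pvP, List.mem_map]
  constructor
  · rintro (h | ⟨r, hr, h1, h2⟩)
    · simp [PySem.Set.empty] at h
    · exact ⟨pyPair r, ⟨r, hr, rfl⟩, h1, h2⟩
  · rintro ⟨p, ⟨r, hr, rfl⟩, h1, h2⟩
    exact Or.inr ⟨r, hr, h1, h2⟩

theorem pvSt2_mem (ids rep : List String) (v a : String) :
    a ∈ (pvSt2 ids rep).getD v PySem.Set.empty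
      ↔ ∃ p ∈ pvP rep, p.2 = v ∧ p.1 = a := by
  rw [pvSt2, pvMemAdj (fun r => (pyPair r).2) (fun r => (pyPair r).1)]
  rw [pvD0_getD]
  simp only [pvP, List.mem_map]
  constructor
  · rintro (h | ⟨r, hr, h1, h2⟩)
    · simp [PySem.Set.empty] at h
    · exact ⟨pyPair r, ⟨r, hr, rfl⟩, h1, h2⟩
  · rintro ⟨p, ⟨r, hr, rfl⟩, h1, h2⟩
    exact Or.inr ⟨r, hr, h1, h2⟩

theorem pvSt1_nodup (ids rep : List String) (u : String) :
    (((pvSt1 ids rep).getD u PySem.Set.empty : PySem.Set String) : List String).Nodup := by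
  rw [pvSt1]
  refine pvNodupAdj _ _ rep (pvD0 ids) (fun w => ?_) u
  rw [pvD0_getD]; exact List.nodup_nil

theorem pvSt2_nodup (ids rep : List String) (v : String) :
    (((pvSt2 ids rep).getD v PySem.Set.empty : PySem.Set String) : List String).Nodup := by
  rw [pvSt2]
  refine pvNodupAdj _ _ rep (pvD0 ids) (fun w => ?_) v
  rw [pvD0_getD]; exact List.nodup_nil

-- membership in B's two per-user lists
theorem pvNrepL_mem (rep : List String) (v a : String) :
    a ∈ pvNrepL rep v ↔ ∃ p ∈ pvP rep, p.2 = v ∧ p.1 = a := by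
  rw [pvNrepL, PySem.Set.mem_ofList]
  simp only [List.mem_map, List.mem_filter, beq_iff_eq]
  constructor
  · rintro ⟨p, ⟨hp, h2⟩, h1⟩; exact ⟨p, hp, h2, h1⟩
  · rintro ⟨p, hp, h2, h1⟩; exact ⟨p, ⟨hp, h2⟩, h1⟩

theorem pvTgtL_mem (rep : List String) (u b : String) :
    b ∈ pvTgtL rep u ↔ ∃ p ∈ pvP rep, p.1 = u ∧ p.2 = b := by
  rw [pvTgtL, PySem.Set.mem_ofList]
  simp only [List.mem_map, List.mem_filter, beq_iff_eq]
  constructor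
  · rintro ⟨p, ⟨hp, h1⟩, h2⟩; exact ⟨p, hp, h1, h2⟩
  · rintro ⟨p, hp, h1, h2⟩; exact ⟨p, ⟨hp, h1⟩, h2⟩

-- A's reported-set length equals B's recomputed distinct-reporter count
theorem pvLen_eq_nrep (ids rep : List String) (v : String) :
    PySem.Set.len ((pvSt2 ids rep).getD v PySem.Set.empty) = PySem.Set.len (pvNrepL rep v) := by
  have hperm := pvPermOf ((pvSt2 ids rep).getD v PySem.Set.empty) (pvNrepL rep v)
    (pvSt2_nodup ids rep v) (PySem.Set.nodup_ofList _)
    (fun a => (pvSt2_mem ids rep v a).trans (pvNrepL_mem rep v a).symm)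
  simp only [PySem.Set.len, hperm.length_eq]

-- the stopped test, expressed through B's recomputed count
theorem pvStop_iff (ids rep : List String) (k : Int) (b : String)
    (hb : ∃ p ∈ pvP rep, p.2 = b) :
    (PySem.Set.contains (pvStp ids rep k) b = true ↔ k ≤ PySem.Set.len (pvNrepL rep b)) := by
  rw [PySem.Set.contains_iff, pvStp,
      pvMemFilterAdd (fun v => k ≤ PySem.Set.len ((pvSt2 ids rep).getD v PySem.Set.empty))]
  have hkey : b ∈ (pvSt2 ids rep).keys := by
    rw [pvSt2, pvKeysAdj (fun r => (pyPair r).2)]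
    obtain ⟨p, hp, h2⟩ := hb
    rw [pvP, List.mem_map] at hp
    obtain ⟨r, hr, hrp⟩ := hp
    exact Or.inr ⟨r, hr, by rw [hrp, h2]⟩
  rw [pvLen_eq_nrep ids rep b]
  constructor
  · rintro (h | ⟨-, h⟩)
    · simp [PySem.Set.empty] at h
    · exact h
  · intro h
    exact Or.inr ⟨hkey, h⟩

theorem pvMain (ids rep : List String) (k : Int) :
    solution ids rep k = solution_alt ids rep k := by
  rw [pvA_unfold, pvB_unfold]
  refine List.map_congr_left ?_
  intro u hu
  rw [pvCountFold, pvSumFold (fun v => k ≤ PySem.Set.len (pvNrepL rep v)), zero_add, zero_add]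
  have hperm := pvPermOf ((pvSt1 ids rep).getD u PySem.Set.empty) (pvTgtL rep u)
    (pvSt1_nodup ids rep u) (PySem.Set.nodup_ofList _)
    (fun b => (pvSt1_mem ids rep u b).trans (pvTgtL_mem rep u b).symm)
  rw [hperm.countP_eq]
  congr 1
  refine List.countP_congr ?_
  intro b hb
  have hbp : ∃ p ∈ pvP rep, p.2 = b := by
    have := (pvTgtL_mem rep u b).mp hb
    obtain ⟨p, hp, -, h2⟩ := this
    exact ⟨p, hp, h2⟩
  simp only [decide_eq_true_eq]
  rw [pvStop_iff ids rep k b hbp]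

-- ===== VERDICT (by name: the statement is the Claim_ definition above) =====
theorem solution_spec : Claim_equal_solution :=
  fun ids rep k _ _ => pvMain ids rep k
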